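-- pv_equiv track=rewrite | github.com/floriangardin/datadoc | datadoc/parser.py | get_import_line
-- ===== SOURCE A (Python) =====
-- def get_import_line(instructions):
--     imports = []
--     for idx, instruction in enumerate(instructions):
--         if instruction.startswith('import '):
--             imports.append([idx, instruction])
--         elif instruction.startswith('from '):
--             imports.append([idx, instruction])
--
--     idxs = set([i[0] for i in imports])
--     instructions = [i for idx, i in enumerate(instructions) if idx not in idxs]
--     imports = [i[1] for i in imports]
--     imports += ['']
--     return imports, instructions
-- ===== SOURCE B (Python) =====
-- def get_import_line(instructions):
--     imports = []
--     others = []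
--     for instruction in instructions:
--         if instruction.startswith(('import ', 'from ')):
--             imports.append(instruction)
--         else:
--             others.append(instruction)
--     imports.append('')
--     return imports, others
-- ===== Notes on version B (the rewrite author's own statement) =====
-- stated objective: simpler
-- what changed: Single partition pass appending each line to imports or others directly, dropping A's index bookkeeping (the [idx, line] pairs, the idxs set and the second filtering scan over the whole list).
import Mathlib
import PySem

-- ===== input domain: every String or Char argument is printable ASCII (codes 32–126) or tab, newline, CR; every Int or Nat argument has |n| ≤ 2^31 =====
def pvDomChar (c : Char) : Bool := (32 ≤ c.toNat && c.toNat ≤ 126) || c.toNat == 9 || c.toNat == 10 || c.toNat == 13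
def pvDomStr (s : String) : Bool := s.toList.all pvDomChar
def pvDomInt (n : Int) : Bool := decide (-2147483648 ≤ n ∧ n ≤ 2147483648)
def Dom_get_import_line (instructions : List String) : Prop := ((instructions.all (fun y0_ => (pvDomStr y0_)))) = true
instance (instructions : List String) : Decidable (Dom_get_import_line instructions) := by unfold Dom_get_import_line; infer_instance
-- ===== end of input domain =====

-- B does one partition pass instead of A's index-pair list + idxs set + second filtering scan (objective: simpler).
-- ===== PORT A =====
def get_import_line (instructions : List String) : List String × List String :=
  let imports := (PySem.List.enumerate instructions 0).foldl
    (fun (acc : List (Int × String)) p =>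
      if PySem.Str.startswith p.2 "import " then acc ++ [p]
      else if PySem.Str.startswith p.2 "from " then acc ++ [p]
      else acc) []
  let idxs : PySem.Set Int := PySem.Set.ofList (imports.map (·.1))
  let instructions2 := (PySem.List.enumerate instructions 0).foldl
    (fun (acc : List String) p =>
      if (PySem.Set.contains idxs p.1) = false then acc ++ [p.2] else acc) []
  let imports2 := imports.map (·.2) ++ [""]
  (imports2, instructions2)

-- ===== PORT B =====
def get_import_line_alt (instructions : List String) : List String × List String :=
  let acc := instructions.foldl
    (fun (acc : List String × List String) s =>
      if PySem.Str.startswith s "import " || PySem.Str.startswith s "from " then (acc.1 ++ [s], acc.2)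
      else (acc.1, acc.2 ++ [s])) ([], [])
  (acc.1 ++ [""], acc.2)

-- ===== PRECONDITION & SPEC =====
def Spec_get_import_line (instructions : List String) (out : List String × List String) : Prop := out = get_import_line_alt instructions
instance (instructions : List String) (out : List String × List String) : Decidable (Spec_get_import_line instructions out) := by unfold Spec_get_import_line; infer_instance

-- ===== CLAIM (what is proved, stated in full; the proofs are below) =====
def Claim_equal_get_import_line : Prop := ∀ (instructions : List String), Dom_get_import_line instructions → Spec_get_import_line instructions (get_import_line instructions)

-- ===== LEMMAS AND PROOFS =====

def isImp (s : String) : Bool := PySem.Str.startswith s "import " || PySem.Str.startswith s "from "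

theorem enum_fst_lb (xs : List String) (n : Int) (p : Int × String)
    (h : p ∈ PySem.List.enumerate xs n) : n ≤ p.1 := by
  induction xs generalizing n with
  | nil => simp [PySem.List.enumerate_nil] at h
  | cons x xs ih =>
    rw [PySem.List.enumerate_cons] at h
    rcases List.mem_cons.mp h with h | h
    · simp [h]
    · have := ih (n + 1) h; omega

theorem enum_fst_inj (xs : List String) (n : Int) (p q : Int × String)
    (hp : p ∈ PySem.List.enumerate xs n) (hq : q ∈ PySem.List.enumerate xs n)
    (h : p.1 = q.1) : p = q := by
  induction xs generalizing n with
  | nil => simp [PySem.List.enumerate_nil] at hp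
  | cons x xs ih =>
    rw [PySem.List.enumerate_cons] at hp hq
    rcases List.mem_cons.mp hp with hp | hp <;> rcases List.mem_cons.mp hq with hq | hq
    · rw [hp, hq]
    · exfalso; have := enum_fst_lb xs (n + 1) q hq; rw [hp] at h; simp at h; omega
    · exfalso; have := enum_fst_lb xs (n + 1) p hp; rw [hq] at h; simp at h; omega
    · exact ih (n + 1) hp hq

theorem map_snd_filter_enum (xs : List String) (n : Int) (P : String → Bool) :
    ((PySem.List.enumerate xs n).filter (fun p => P p.2)).map (·.2) = xs.filter P := by
  induction xs generalizing n with
  | nil => simp [PySem.List.enumerate_nil]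
  | cons x xs ih =>
    rw [PySem.List.enumerate_cons]
    by_cases h : P x <;> simp [List.filter_cons, h, ih (n + 1)]

-- A's first loop builds exactly the (index, line) pairs whose line is an import line
theorem imports_fold (xs : List String) (n : Int) :
    (PySem.List.enumerate xs n).foldl
      (fun (acc : List (Int × String)) p =>
        if PySem.Str.startswith p.2 "import " then acc ++ [p]
        else if PySem.Str.startswith p.2 "from " then acc ++ [p]
        else acc) []
    = (PySem.List.enumerate xs n).filter (fun q => isImp q.2) := by
  refine (PySem.List.foldl_congr_mem _ _
    (fun (acc : List (Int × String)) q => if isImp q.2 then acc ++ [id q] else acc) [] ?_).trans ?_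
  · intro acc q _
    cases h1 : PySem.Str.startswith q.2 "import " <;>
      cases h2 : PySem.Str.startswith q.2 "from " <;>
        simp only [isImp, h1, h2, Bool.true_or, Bool.false_or, if_true, if_false,
          Bool.false_eq_true, ite_self, id_eq]
  · simpa using PySem.List.foldl_append_if (fun q : Int × String => isImp q.2) id
      (PySem.List.enumerate xs n) []

-- membership of an index in A's idxs set decides exactly whether that line is an import line
theorem contains_idxs (xs : List String) (p : Int × String)
    (hp : p ∈ PySem.List.enumerate xs 0) :
    PySem.Set.contains
      (PySem.Set.ofList (((PySem.List.enumerate xs 0).filter (fun q => isImp q.2)).map (·.1))) p.1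
      = isImp p.2 := by
  by_cases h : isImp p.2
  · rw [h]
    have hm : p.1 ∈ ((PySem.List.enumerate xs 0).filter (fun q => isImp q.2)).map (·.1) :=
      List.mem_map.mpr ⟨p, List.mem_filter.mpr ⟨hp, h⟩, rfl⟩
    rw [PySem.Set.contains_iff, PySem.Set.mem_ofList]
    exact hm
  · rw [Bool.not_eq_true] at h
    rw [h]
    have hm : p.1 ∉ ((PySem.List.enumerate xs 0).filter (fun q => isImp q.2)).map (·.1) := by
      intro hmem
      rcases List.mem_map.mp hmem with ⟨q, hq, hq1⟩
      rcases List.mem_filter.mp hq with ⟨hqe, hqi⟩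
      have heq := enum_fst_inj xs 0 p q hp hqe hq1.symm
      rw [heq, hqi] at h
      exact absurd h (by simp)
    simp only [Bool.eq_false_iff, Ne, PySem.Set.contains_iff, PySem.Set.mem_ofList]
    exact hm

-- B's single pass partitions into the import lines and the rest, each in order
theorem alt_fold (xs : List String) (a b : List String) :
    xs.foldl (fun (acc : List String × List String) s =>
      if PySem.Str.startswith s "import " || PySem.Str.startswith s "from " then (acc.1 ++ [s], acc.2)
      else (acc.1, acc.2 ++ [s])) (a, b)
    = (a ++ xs.filter isImp, b ++ xs.filter (fun s => !(isImp s))) := by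
  induction xs generalizing a b with
  | nil => simp
  | cons x xs ih =>
    by_cases h : isImp x
    · have h' : (PySem.Str.startswith x "import " || PySem.Str.startswith x "from ") = true := h
      rw [List.foldl_cons, if_pos h']
      rw [ih (a ++ [x]) b]
      simp [List.filter_cons, h]
    · have h' : (PySem.Str.startswith x "import " || PySem.Str.startswith x "from ") = false := by
        simpa [isImp] using h
      rw [List.foldl_cons, if_neg (by rw [h']; exact Bool.false_ne_true)]
      rw [ih a (b ++ [x])]
      simp [List.filter_cons, h]

-- ===== VERDICT (by name: the statement is the Claim_ definition above) =====
theorem get_import_line_spec : Claim_equal_get_import_line := by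
  intro xs _
  unfold Spec_get_import_line get_import_line get_import_line_alt
  rw [alt_fold xs [] []]
  simp only [List.nil_append]
  rw [imports_fold xs 0]
  simp only [Prod.mk.injEq]
  refine ⟨?_, ?_⟩
  · rw [map_snd_filter_enum xs 0 isImp]
  · refine (PySem.List.foldl_congr_mem _ _
      (fun (acc : List String) (p : Int × String) => if !(isImp p.2) then acc ++ [p.2] else acc)
      [] ?_).trans ?_
    · intro acc p hp
      rw [contains_idxs xs p hp]
      cases h : isImp p.2 <;> simp [h]
    · refine (PySem.List.foldl_append_if (fun p : Int × String => !(isImp p.2)) (·.2)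
        (PySem.List.enumerate xs 0) []).trans ?_
      rw [List.nil_append]
      exact map_snd_filter_enum xs 0 (fun s => !(isImp s))
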